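-- pv_equiv track=rewrite | github.com/MrBrantCode/unitest_baseline | mut_generate/mist_train_taco/taco_12619/solution.py | find_shortest_subarray_length_with_degree
-- ===== SOURCE A (Python) =====
-- def find_shortest_subarray_length_with_degree(nums):
--     from collections import defaultdict
--
--     # Step 1: Calculate the frequency of each element
--     frequency = defaultdict(int)
--     for num in nums:
--         frequency[num] += 1
--
--     # Step 2: Determine the degree of the array
--     degree = max(frequency.values())
--
--     # Step 3: If the degree is 1, the shortest subarray length is 1
--     if degree == 1:
--         return 1
--
--     # Step 4: Find all elements that have the maximum frequency (degree)
--     max_frequency_elements = [num for num, freq in frequency.items() if freq == degree]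
--
--     # Step 5: Calculate the shortest subarray length for each element with the maximum frequency
--     min_length = float('inf')
--     for element in max_frequency_elements:
--         # Find the first and last occurrence of the element
--         first_occurrence = nums.index(element)
--         last_occurrence = len(nums) - 1 - nums[::-1].index(element)
--
--         # Calculate the length of the subarray
--         subarray_length = last_occurrence - first_occurrence + 1
--
--         # Update the minimum length if this subarray is shorter
--         if subarray_length < min_length:
--             min_length = subarray_length
--
--     return min_length
-- ===== SOURCE B (Python) =====
-- def find_shortest_subarray_length_with_degree(nums):
--     # One counting pass to get the degree, then a sliding window:
--     # the answer is the shortest window in which some element attains the degree.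
--     freq = {}
--     for x in nums:
--         freq[x] = freq.get(x, 0) + 1
--     degree = max(freq.values())
--     best = len(nums)
--     cnt = {}
--     left = 0
--     for right, x in enumerate(nums):
--         cnt[x] = cnt.get(x, 0) + 1
--         while cnt[x] == degree:
--             if right - left + 1 < best:
--                 best = right - left + 1
--             cnt[nums[left]] -= 1
--             left += 1
--     return best
-- ===== Notes on version B (the rewrite author's own statement) =====
-- stated objective: alternative
-- what changed: B replaces A's per-candidate min-span computation (frequency dict plus forward/backward .index scans for every max-frequency element) with a sliding-window two-pointer scan that shrinks the window whenever some element attains the degree inside it; no first/last occurrence indices are ever computed.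
import Mathlib
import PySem

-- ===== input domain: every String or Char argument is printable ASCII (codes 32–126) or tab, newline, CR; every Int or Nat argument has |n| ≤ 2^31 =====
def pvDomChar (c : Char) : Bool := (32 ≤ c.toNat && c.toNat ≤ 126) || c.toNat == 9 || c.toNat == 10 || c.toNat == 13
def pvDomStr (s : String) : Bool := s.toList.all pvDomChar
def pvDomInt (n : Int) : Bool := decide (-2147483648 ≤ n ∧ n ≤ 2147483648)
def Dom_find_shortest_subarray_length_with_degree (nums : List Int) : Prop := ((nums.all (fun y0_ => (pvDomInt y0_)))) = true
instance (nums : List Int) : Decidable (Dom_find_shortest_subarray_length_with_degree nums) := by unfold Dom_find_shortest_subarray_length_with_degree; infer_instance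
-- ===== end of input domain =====

-- B replaces A's per-candidate span computation with a sliding-window two-pointer scan; A raises ValueError on the empty list, excluded by Pre_.


-- ===== PORT A =====
def find_shortest_subarray_length_with_degree (nums : List Int) : Int :=
  -- frequency = defaultdict(int); for num in nums: frequency[num] += 1
  let frequency : PySem.Dict Int Int := nums.foldl (fun d x => d.modify x 0 (· + 1)) PySem.Dict.empty
  -- degree = max(frequency.values())  — max([]) raises ValueError: none, excluded by Pre_
  match PySem.List.max? frequency.values (fun v => v) with
  | none => 0
  | some degree =>
    if degree == 1 then 1
    else
      let max_frequency_elements := (frequency.items.filter (fun p => p.2 == degree)).map (·.1)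
      -- min_length = float('inf'); none models inf (on Pre_ the loop always runs: degree ≥ 2)
      let min_length := max_frequency_elements.foldl
        (fun (acc : Option Int) element =>
          match PySem.List.index? nums element,
                PySem.List.index? ((PySem.List.slice? nums none none (-1)).getD []) element with
          -- nums[::-1] is exactly slice? nums none none (-1), always some (step ≠ 0)
          | some first_occurrence, some ridx =>
            let last_occurrence : Int := (nums.length : Int) - 1 - (ridx : Int)
            let subarray_length := last_occurrence - (first_occurrence : Int) + 1
            (match acc with
             | none => some subarray_length
             | some m => if subarray_length < m then some subarray_length else some m)
          | _, _ => acc   -- unreachable: element occurs in nums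
        ) none
      match min_length with
      | none => 0   -- unreachable on Pre_: Python would return float('inf')
      | some m => m

-- ===== PORT B =====
-- the inner 'while cnt[x] == degree' loop of B; fuel bounds the iterations (each one advances left,
-- and the condition fails at latest when left passes right, so the given fuel is never exhausted)
def pvShrink (nums : List Int) (degree x r : Int) :
    Nat → PySem.Dict Int Int × Int × Int → PySem.Dict Int Int × Int × Int
  | 0, st => st
  | fuel + 1, (cnt, left, best) =>
    if cnt.getD x 0 == degree then
      let best := if r - left + 1 < best then r - left + 1 else best
      -- cnt[nums[left]] -= 1 : the key nums[left] is always present (its count in the window is ≥ 1);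
      -- nums[left] is in range whenever the loop runs, so the .getD 0 default is never used
      let cnt := cnt.modify ((PySem.List.pyGet? nums left).getD 0) 0 (· - 1)
      pvShrink nums degree x r fuel (cnt, left + 1, best)
    else (cnt, left, best)

def find_shortest_subarray_length_with_degree_alt (nums : List Int) : Int :=
  -- freq = {}; for x in nums: freq[x] = freq.get(x, 0) + 1
  let freq := nums.foldl (fun d x => d.insert x (d.getD x 0 + 1)) PySem.Dict.empty
  -- degree = max(freq.values())  — max([]) raises ValueError: none, excluded by Pre_
  match PySem.List.max? freq.values (fun v => v) with
  | none => 0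
  | some degree =>
    -- best = len(nums); cnt = {}; left = 0; sliding-window pass
    let st := (PySem.List.enumerate nums 0).foldl
      (fun (st : PySem.Dict Int Int × Int × Int) (p : Int × Int) =>
        let cnt := st.1.insert p.2 (st.1.getD p.2 0 + 1)
        pvShrink nums degree p.2 p.1 ((p.1 - st.2.1).toNat + 1) (cnt, st.2.1, st.2.2))
      (PySem.Dict.empty, 0, (nums.length : Int))
    st.2.2

-- ===== PRECONDITION & SPEC =====
-- Pre_ excludes exactly the empty list, on which Python A raises ValueError (max of an empty sequence).
def Pre_find_shortest_subarray_length_with_degree (nums : List Int) : Prop := nums ≠ []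
instance (nums : List Int) : Decidable (Pre_find_shortest_subarray_length_with_degree nums) := by unfold Pre_find_shortest_subarray_length_with_degree; infer_instance
def pvWitness_find_shortest_subarray_length_with_degree : List Int := [1, 2, 2, 3, 1]

def Spec_find_shortest_subarray_length_with_degree (nums : List Int) (out : Int) : Prop := out = find_shortest_subarray_length_with_degree_alt nums
instance (nums : List Int) (out : Int) : Decidable (Spec_find_shortest_subarray_length_with_degree nums out) := by unfold Spec_find_shortest_subarray_length_with_degree; infer_instance

-- ===== CLAIM (what is proved, stated in full; the proofs are below) =====
def Claim_equal_find_shortest_subarray_length_with_degree : Prop := ∀ (nums : List Int), Dom_find_shortest_subarray_length_with_degree nums → Pre_find_shortest_subarray_length_with_degree nums → Spec_find_shortest_subarray_length_with_degree nums (find_shortest_subarray_length_with_degree nums)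

-- ===== LEMMAS AND PROOFS =====

-- fold-min / fold-max facts used by the invariant proof
theorem pv_foldl_min_le_init (l : List Int) (init : Int) : l.foldl min init ≤ init := by
  induction l generalizing init with
  | nil => simp
  | cons a t ih => exact le_trans (ih (min init a)) (min_le_left _ _)

theorem pv_foldl_min_le_mem (l : List Int) (init : Int) {y : Int} (hy : y ∈ l) : l.foldl min init ≤ y := by
  induction l generalizing init with
  | nil => simp at hy
  | cons a t ih =>
    rcases List.mem_cons.mp hy with h | h
    · subst h; exact le_trans (pv_foldl_min_le_init t _) (min_le_right _ _)
    · exact ih (min init a) h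

theorem pv_le_foldl_min (l : List Int) (init c : Int) (h : ∀ y ∈ l, c ≤ y) (hi : c ≤ init) :
    c ≤ l.foldl min init := by
  induction l generalizing init with
  | nil => simpa
  | cons a t ih =>
    exact ih (min init a) (fun y hy => h y (List.mem_cons_of_mem a hy))
      (le_min hi (h a List.mem_cons_self))

theorem pv_foldl_min_cons (l : List Int) (init a : Int) :
    (a :: l).foldl min init = min (l.foldl min init) a := by
  show l.foldl min (min init a) = _
  induction l generalizing init with
  | nil => simp [min_comm]
  | cons b t ih =>
    simp only [List.foldl_cons]
    rw [← ih, min_right_comm]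

theorem pv_foldl_max_le (l : List Int) (init c : Int) (h : ∀ y ∈ l, y ≤ c) (hi : init ≤ c) :
    l.foldl max init ≤ c := by
  induction l generalizing init with
  | nil => simpa
  | cons a t ih =>
    exact ih (max init a) (fun y hy => h y (List.mem_cons_of_mem a hy))
      (max_le hi (h a List.mem_cons_self))

theorem pv_foldl_max_cons (l : List Int) (init a : Int) :
    (a :: l).foldl max init = max (l.foldl max init) a := by
  show l.foldl max (max init a) = _
  induction l generalizing init with
  | nil => simp [max_comm]
  | cons b t ih =>
    simp only [List.foldl_cons]
    rw [← ih, max_right_comm]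

theorem pv_foldl_max_attained (l : List Int) (init : Int) :
    l.foldl max init = init ∨ l.foldl max init ∈ l := by
  induction l generalizing init with
  | nil => exact Or.inl rfl
  | cons a t ih =>
    rcases ih (max init a) with h | h
    · simp only [List.foldl_cons, h]
      rcases le_or_gt init a with h2 | h2
      · exact Or.inr (by simp [max_eq_right h2])
      · exact Or.inl (max_eq_left h2.le)
    · exact Or.inr (List.mem_cons_of_mem a (by simpa using h))


def pvFirstN (nums : List Int) (e : Int) : Nat := (PySem.List.index? nums e).getD 0
def pvLastN (nums : List Int) (e : Int) : Nat := nums.length - 1 - (PySem.List.index? nums.reverse e).getD 0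

theorem pv_first_spec {nums : List Int} {x : Int} (h : x ∈ nums) :
    pvFirstN nums x < nums.length ∧ nums[pvFirstN nums x]? = some x ∧
      ∀ j, j < pvFirstN nums x → nums[j]? ≠ some x := by
  obtain ⟨k, hk⟩ := Option.isSome_iff_exists.mp ((PySem.List.index?_isSome_iff nums x).mpr h)
  obtain ⟨hlt, hval, hmin⟩ := PySem.List.getElem_of_index?_eq_some hk
  have hfk : pvFirstN nums x = k := by unfold pvFirstN; rw [hk]; rfl
  refine ⟨hfk ▸ hlt, ?_, ?_⟩
  · rw [hfk, List.getElem?_eq_getElem hlt, hval]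
  · intro j hj
    rw [hfk] at hj
    intro hc
    have hjn : j < nums.length := lt_trans hj hlt
    rw [List.getElem?_eq_getElem hjn] at hc
    exact hmin j hj (Option.some.inj hc)

theorem pv_last_spec {nums : List Int} {x : Int} (h : x ∈ nums) :
    pvLastN nums x < nums.length ∧ nums[pvLastN nums x]? = some x ∧
      ∀ j, pvLastN nums x < j → nums[j]? ≠ some x := by
  obtain ⟨k, hk⟩ := Option.isSome_iff_exists.mp
    ((PySem.List.index?_isSome_iff nums.reverse x).mpr (List.mem_reverse.mpr h))
  obtain ⟨hlt, hval, hmin⟩ := PySem.List.getElem_of_index?_eq_some hk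
  rw [List.length_reverse] at hlt
  have hL : pvLastN nums x = nums.length - 1 - k := by unfold pvLastN; rw [hk]; rfl
  have hn : 0 < nums.length := List.length_pos_of_mem h
  have hLn : pvLastN nums x < nums.length := by omega
  refine ⟨hLn, ?_, ?_⟩
  · have hv? : nums.reverse[k]? = some x := by
      rw [List.getElem?_eq_getElem (by simpa using hlt)]; exact congrArg some hval
    rw [List.getElem?_reverse (by simpa using hlt)] at hv?
    rw [hL]; exact hv?
  · intro j hj hc
    by_cases hjn : j < nums.length
    · have hj' : nums.length - 1 - j < k := by omega
      have hrev : nums.reverse[nums.length - 1 - j]? = nums[j]? := by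
        rw [List.getElem?_reverse (by omega)]
        congr 1
        omega
      rw [hc] at hrev
      have : nums.reverse[nums.length - 1 - j]'(by simpa using (by omega : nums.length - 1 - j < nums.length)) = x := by
        have := List.getElem?_eq_some_iff.mp hrev
        obtain ⟨h1, h2⟩ := this
        exact h2
      exact hmin _ hj' this
    · rw [List.getElem?_eq_none_iff.mpr (by omega)] at hc
      simp at hc

theorem pv_first_le {nums : List Int} {x : Int} {r : Nat} (hr : nums[r]? = some x) :
    pvFirstN nums x ≤ r := by
  have h : x ∈ nums := by
    have := List.getElem?_eq_some_iff.mp hr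
    obtain ⟨hlt, hval⟩ := this
    exact hval ▸ List.getElem_mem hlt
  by_contra hc
  exact (pv_first_spec h).2.2 r (by omega) hr

theorem pv_last_ge {nums : List Int} {x : Int} {r : Nat} (hr : nums[r]? = some x) :
    r ≤ pvLastN nums x := by
  have h : x ∈ nums := by
    obtain ⟨hlt, hval⟩ := List.getElem?_eq_some_iff.mp hr
    exact hval ▸ List.getElem_mem hlt
  by_contra hc
  exact (pv_last_spec h).2.2 r (by omega) hr

theorem pv_first_le_last {nums : List Int} {x : Int} (h : x ∈ nums) :
    pvFirstN nums x ≤ pvLastN nums x :=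
  pv_first_le (pv_last_spec h).2.1

theorem pv_count_take_zero_iff {nums : List Int} {x : Int} (h : x ∈ nums) (l : Nat) :
    (nums.take l).count x = 0 ↔ l ≤ pvFirstN nums x := by
  rw [List.count_eq_zero]
  constructor
  · intro hnm
    by_contra hc
    apply hnm
    rw [List.mem_iff_getElem?]
    exact ⟨pvFirstN nums x, by rw [List.getElem?_take, if_pos (by omega)]; exact (pv_first_spec h).2.1⟩
  · intro hle hmem
    obtain ⟨i, hi⟩ := List.mem_iff_getElem?.mp hmem
    rw [List.getElem?_take] at hi
    by_cases hil : i < l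
    · rw [if_pos hil] at hi
      exact (pv_first_spec h).2.2 i (by omega) hi
    · rw [if_neg hil] at hi
      simp at hi

theorem pv_count_drop_zero_iff {nums : List Int} {x : Int} (h : x ∈ nums) (r : Nat) :
    (nums.drop r).count x = 0 ↔ pvLastN nums x < r := by
  rw [List.count_eq_zero]
  constructor
  · intro hnm
    by_contra hc
    apply hnm
    rw [List.mem_iff_getElem?]
    refine ⟨pvLastN nums x - r, ?_⟩
    rw [List.getElem?_drop]
    have : r + (pvLastN nums x - r) = pvLastN nums x := by omega
    rw [this]
    exact (pv_last_spec h).2.1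
  · intro hlt hmem
    obtain ⟨i, hi⟩ := List.mem_iff_getElem?.mp hmem
    rw [List.getElem?_drop] at hi
    exact (pv_last_spec h).2.2 (r + i) (by omega) hi

theorem pv_count_decomp (nums : List Int) (v : Int) (l r : Nat) (hl : l ≤ r) :
    nums.count v =
      (nums.take l).count v + ((nums.take r).drop l).count v + (nums.drop r).count v := by
  conv_lhs => rw [← List.take_append_drop r nums]
  rw [List.count_append]
  congr 1
  conv_lhs => rw [← List.take_append_drop l (nums.take r)]
  rw [List.count_append, List.take_take, min_eq_left hl]

theorem pv_win_count_eq {nums : List Int} {x : Int} (h : x ∈ nums) {l r : Nat}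
    (h1 : l ≤ pvFirstN nums x) (h2 : pvLastN nums x < r) :
    ((nums.take r).drop l).count x = nums.count x := by
  have hd := pv_count_decomp nums x l r (le_trans (le_trans h1 (pv_first_le_last h)) (by omega))
  have ha := (pv_count_take_zero_iff h l).mpr h1
  have hb := (pv_count_drop_zero_iff h r).mpr h2
  omega

theorem pv_win_count_lt {nums : List Int} {x : Int} (h : x ∈ nums) {l r : Nat}
    (hlr : l ≤ r) (hno : ¬(l ≤ pvFirstN nums x ∧ pvLastN nums x < r)) :
    ((nums.take r).drop l).count x < nums.count x := by
  have hd := pv_count_decomp nums x l r hlr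
  rcases not_and_or.mp hno with hc | hc
  · have : (nums.take l).count x ≠ 0 := fun h0 => hc ((pv_count_take_zero_iff h l).mp h0)
    omega
  · have : (nums.drop r).count x ≠ 0 := fun h0 => hc ((pv_count_drop_zero_iff h r).mp h0)
    omega

theorem pv_win_succ {nums : List Int} (l r : Nat) (hl : l ≤ r) {x : Int}
    (hr : nums[r]? = some x) :
    (nums.take (r + 1)).drop l = (nums.take r).drop l ++ [x] := by
  have hrn : r < nums.length := (List.getElem?_eq_some_iff.mp hr).1
  rw [List.take_add_one, hr]
  rw [List.drop_append_of_le_length (by rw [List.length_take]; omega)]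
  rfl

theorem pv_win_cons {nums : List Int} (l r : Nat) (h : l < r) {x : Int}
    (hl : nums[l]? = some x) :
    (nums.take r).drop l = x :: (nums.take r).drop (l + 1) := by
  obtain ⟨hlt, hval⟩ := List.getElem?_eq_some_iff.mp hl
  rw [List.drop_eq_getElem_cons (by rw [List.length_take]; omega)]
  congr 1
  rw [List.getElem_take]
  exact hval

theorem pv_shrink_noop (nums : List Int) (d x r : Int) (cnt : PySem.Dict Int Int)
    (left best : Int) (h : cnt.getD x 0 ≠ d) (fuel : Nat) :
    pvShrink nums d x r fuel (cnt, left, best) = (cnt, left, best) := by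
  cases fuel with
  | zero => rfl
  | succ n => simp [pvShrink, h]

theorem pv_shrink_run (nums : List Int) (d x : Int) (rN : Nat) (hx : x ∈ nums)
    (hd : (nums.count x : Int) = d)
    (hr : pvLastN nums x ≤ rN) :
    ∀ (fuel lN : Nat) (cnt : PySem.Dict Int Int) (best : Int),
      (∀ v, cnt.getD v 0 = (((nums.take (rN + 1)).drop lN).count v : Int)) →
      lN ≤ pvFirstN nums x →
      pvFirstN nums x - lN < fuel →
      (∀ v, (pvShrink nums d x (rN : Int) fuel (cnt, (lN : Int), best)).1.getD v 0 =
          (((nums.take (rN + 1)).drop (pvFirstN nums x + 1)).count v : Int)) ∧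
      (pvShrink nums d x (rN : Int) fuel (cnt, (lN : Int), best)).2.1 =
          ((pvFirstN nums x : Int) + 1) ∧
      (pvShrink nums d x (rN : Int) fuel (cnt, (lN : Int), best)).2.2 =
          min best ((rN : Int) - (pvFirstN nums x : Int) + 1) := by
  intro fuel
  induction fuel with
  | zero => intro lN cnt best _ _ hfuel; omega
  | succ fuel ih =>
    intro lN cnt best hcnt hlf hfuel
    have hfn : pvFirstN nums x < nums.length := (pv_first_spec hx).1
    have hfl : pvFirstN nums x ≤ pvLastN nums x := pv_first_le_last hx
    have hln : lN < nums.length := by omega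
    have hcond : cnt.getD x 0 = d := by
      rw [hcnt x, pv_win_count_eq hx hlf (by omega)]; exact hd
    have hkey : (PySem.List.pyGet? nums ((lN : Nat) : Int)).getD 0 = nums[lN]'hln := by
      simp [PySem.List.pyGet?_natCast, List.getElem?_eq_getElem hln]
    have hwin : (nums.take (rN + 1)).drop lN = nums[lN]'hln :: (nums.take (rN + 1)).drop (lN + 1) :=
      pv_win_cons lN (rN + 1) (by omega) (List.getElem?_eq_getElem hln)
    have hcnt1 : ∀ v, ((cnt.modify ((PySem.List.pyGet? nums ((lN : Nat) : Int)).getD 0) 0 (· - 1)).getD v 0)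
        = (((nums.take (rN + 1)).drop (lN + 1)).count v : Int) := by
      intro v
      rw [hkey, PySem.Dict.getD_modify]
      by_cases hv : v = nums[lN]'hln
      · subst hv
        rw [if_pos rfl, hcnt, hwin, List.count_cons]
        simp
      · rw [if_neg hv, hcnt v, hwin, List.count_cons]
        have : (nums[lN]'hln == v) = false := by
          simp only [beq_eq_false_iff_ne]; exact fun hh => hv hh.symm
        rw [this]
        simp
    simp only [pvShrink, hcond, BEq.rfl, if_true]
    rcases Nat.lt_or_ge lN (pvFirstN nums x) with hlt | hge
    · -- nums[lN] ≠ x : keep shrinking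
      have hcast : ((lN : Int) + 1) = ((lN + 1 : Nat) : Int) := by push_cast; ring
      rw [hcast]
      have hres := ih (lN + 1) _ (if (rN : Int) - (lN : Int) + 1 < best then (rN : Int) - (lN : Int) + 1 else best) hcnt1 (by omega) (by omega)
      refine ⟨hres.1, hres.2.1, ?_⟩
      rw [hres.2.2]
      have hspan : (rN : Int) - (pvFirstN nums x : Int) + 1 ≤ (rN : Int) - (lN : Int) + 1 := by
        omega
      split_ifs with hb <;> omega
    · -- lN = pvFirstN : one more step, then the condition fails
      have heq : lN = pvFirstN nums x := by omega
      have hstop : (cnt.modify ((PySem.List.pyGet? nums ((lN : Nat) : Int)).getD 0) 0 (· - 1)).getD x 0 ≠ d := by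
        rw [hcnt1 x]
        have hxl : nums[lN]'hln = x := by
          have := (pv_first_spec hx).2.1
          rw [← heq, List.getElem?_eq_getElem hln] at this
          exact Option.some.inj this
        have h2 : (((nums.take (rN + 1)).drop lN).count x : Int) = d := by
          rw [pv_win_count_eq hx hlf (by omega)]; exact hd
        rw [hwin, hxl, List.count_cons] at h2
        simp at h2
        omega
      rw [pv_shrink_noop _ _ _ _ _ _ _ hstop]
      subst heq
      refine ⟨hcnt1, rfl, ?_⟩
      dsimp only
      split_ifs with hb <;> omega

def pvSpan (nums : List Int) (e : Int) : Int := (pvLastN nums e : Int) - (pvFirstN nums e : Int) + 1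
def pvCands (nums : List Int) (d r : Int) : List Int :=
  (PySem.Set.ofList nums).filter (fun x => decide ((nums.count x : Int) = d) && decide ((pvLastN nums x : Int) < r))
def pvL (nums : List Int) (d r : Int) : Int :=
  ((pvCands nums d r).map (fun x => (pvFirstN nums x : Int) + 1)).foldl max 0
def pvBestF (nums : List Int) (d r : Int) : Int :=
  ((pvCands nums d r).map (fun x => pvSpan nums x)).foldl min (nums.length : Int)

theorem pv_last_inj {nums : List Int} {y x : Int} {rN : Nat} (hy : y ∈ nums)
    (hr : nums[rN]? = some x) (hl : pvLastN nums y = rN) : y = x := by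
  have := (pv_last_spec hy).2.1
  rw [hl, hr] at this
  exact (Option.some.inj this).symm

theorem pv_cands_zero (nums : List Int) (d : Int) : pvCands nums d 0 = [] := by
  unfold pvCands
  rw [List.filter_eq_nil_iff]
  intro y _
  simp

theorem pv_cands_succ_eq {nums : List Int} {d x : Int} {rN : Nat}
    (hr : nums[rN]? = some x) (hno : ¬((nums.count x : Int) = d ∧ pvLastN nums x = rN)) :
    pvCands nums d ((rN : Int) + 1) = pvCands nums d (rN : Int) := by
  unfold pvCands
  apply List.filter_congr
  intro y hy
  have hyn : y ∈ nums := (PySem.Set.mem_ofList _ _).mp hy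
  by_cases hc : (nums.count y : Int) = d
  · have hne : pvLastN nums y ≠ rN := by
      intro hl
      have := pv_last_inj hyn hr hl
      subst this
      exact hno ⟨hc, hl⟩
    have : ((pvLastN nums y : Int) < (rN : Int) + 1) ↔ ((pvLastN nums y : Int) < (rN : Int)) := by
      constructor <;> intro h <;> [omega; omega]
    simp [hc, this]
  · simp [hc]

theorem pv_cands_succ_perm {nums : List Int} {d x : Int} {rN : Nat}
    (hr : nums[rN]? = some x)
    (hx : x ∈ nums) (hc : (nums.count x : Int) = d) (hl : pvLastN nums x = rN) :
    (pvCands nums d ((rN : Int) + 1)).Perm (x :: pvCands nums d (rN : Int)) := by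
  obtain ⟨b1, b2, hsplit⟩ := List.append_of_mem ((PySem.Set.mem_ofList nums x).mpr hx)
  have hnd : (PySem.Set.ofList nums).Nodup := PySem.Set.nodup_ofList nums
  rw [hsplit, List.nodup_middle] at hnd
  have hxm : x ∉ b1 ++ b2 := (List.nodup_cons.mp hnd).1
  have hmemn : ∀ y, y ∈ b1 ∨ y ∈ b2 → y ∈ nums := by
    intro y hy
    apply (PySem.Set.mem_ofList nums y).mp
    rw [hsplit]
    rcases hy with h | h
    · exact List.mem_append.mpr (Or.inl h)
    · exact List.mem_append.mpr (Or.inr (List.mem_cons_of_mem x h))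
  have hagree : ∀ y, y ∈ b1 ∨ y ∈ b2 →
      (decide ((nums.count y : Int) = d) && decide ((pvLastN nums y : Int) < (rN : Int) + 1))
      = (decide ((nums.count y : Int) = d) && decide ((pvLastN nums y : Int) < (rN : Int))) := by
    intro y hy
    have hyx : y ≠ x := fun h => hxm (h ▸ List.mem_append.mpr hy)
    have hne : pvLastN nums y ≠ rN := fun h => hyx (pv_last_inj (hmemn y hy) hr h)
    by_cases hcy : (nums.count y : Int) = d
    · have : ((pvLastN nums y : Int) < (rN : Int) + 1) ↔ ((pvLastN nums y : Int) < (rN : Int)) := by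
        omega
      simp [hcy, this]
    · simp [hcy]
  have hpx1 : (decide ((nums.count x : Int) = d) && decide ((pvLastN nums x : Int) < (rN : Int) + 1)) = true := by
    simp [hc, hl]
  have hpx0 : (decide ((nums.count x : Int) = d) && decide ((pvLastN nums x : Int) < (rN : Int))) = false := by
    simp [hl]
  unfold pvCands
  rw [hsplit]
  rw [List.filter_append, List.filter_append, List.filter_cons, List.filter_cons]
  rw [hpx1, hpx0]
  simp only [if_true]
  rw [List.filter_congr (fun y hy => hagree y (Or.inl hy)),
      List.filter_congr (fun y hy => hagree y (Or.inr hy))]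
  exact List.perm_middle

theorem pv_foldl_min_perm {l1 l2 : List Int} (h : l1.Perm l2) (i : Int) :
    l1.foldl min i = l2.foldl min i := h.foldl_eq i

theorem pv_foldl_max_perm {l1 l2 : List Int} (h : l1.Perm l2) (i : Int) :
    l1.foldl max i = l2.foldl max i := h.foldl_eq i

theorem pv_L_succ_new {nums : List Int} {d x : Int} {rN : Nat}
    (hr : nums[rN]? = some x) (hx : x ∈ nums) (hc : (nums.count x : Int) = d)
    (hl : pvLastN nums x = rN) :
    pvL nums d ((rN : Int) + 1) = max (pvL nums d (rN : Int)) ((pvFirstN nums x : Int) + 1) := by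
  unfold pvL
  rw [pv_foldl_max_perm ((pv_cands_succ_perm hr hx hc hl).map _) 0]
  rw [List.map_cons, pv_foldl_max_cons]

theorem pv_Best_succ_new {nums : List Int} {d x : Int} {rN : Nat}
    (hr : nums[rN]? = some x) (hx : x ∈ nums) (hc : (nums.count x : Int) = d)
    (hl : pvLastN nums x = rN) :
    pvBestF nums d ((rN : Int) + 1) = min (pvBestF nums d (rN : Int)) (pvSpan nums x) := by
  unfold pvBestF
  rw [pv_foldl_min_perm ((pv_cands_succ_perm hr hx hc hl).map _) _]
  rw [List.map_cons, pv_foldl_min_cons]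

theorem pv_L_nonneg (nums : List Int) (d r : Int) : 0 ≤ pvL nums d r :=
  (PySem.List.le_foldl_max _ 0).1

theorem pv_cands_mem {nums : List Int} {d r z : Int} (hz : z ∈ pvCands nums d r) :
    z ∈ nums ∧ (nums.count z : Int) = d ∧ (pvLastN nums z : Int) < r := by
  have h1 := List.mem_of_mem_filter hz
  have h2 := List.of_mem_filter hz
  simp only [Bool.and_eq_true, decide_eq_true_eq] at h2
  exact ⟨(PySem.Set.mem_ofList _ _).mp h1, h2.1, h2.2⟩

theorem pv_L_le {nums : List Int} {d r : Int} (hr : 0 ≤ r) : pvL nums d r ≤ r := by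
  apply pv_foldl_max_le _ _ _ _ hr
  intro y hy
  obtain ⟨z, hz, hzy⟩ := List.mem_map.mp hy
  obtain ⟨hzn, _, hzl⟩ := pv_cands_mem hz
  have := pv_first_le_last hzn
  omega

theorem pv_L_attained {nums : List Int} {d r : Int} (h : pvL nums d r ≠ 0) :
    ∃ z ∈ pvCands nums d r, pvL nums d r = (pvFirstN nums z : Int) + 1 := by
  rcases pv_foldl_max_attained ((pvCands nums d r).map (fun x => (pvFirstN nums x : Int) + 1)) 0 with h0 | hm
  · exact absurd h0 h
  · obtain ⟨z, hz, hzy⟩ := List.mem_map.mp hm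
    exact ⟨z, hz, hzy.symm⟩

theorem pv_Best_le_mem {nums : List Int} {d r z : Int} (hz : z ∈ pvCands nums d r) :
    pvBestF nums d r ≤ pvSpan nums z :=
  pv_foldl_min_le_mem _ _ (List.mem_map.mpr ⟨z, hz, rfl⟩)

-- degree facts
theorem pv_values_counter (nums : List Int) :
    (PySem.Dict.counter nums).values = (PySem.Set.ofList nums).map (fun k => (nums.count k : Int)) := by
  have : (PySem.Dict.counter nums).values = (PySem.Dict.counter nums).items.map (·.2) := rfl
  rw [this, PySem.Dict.items_counter, List.map_map]
  rfl

theorem pv_count_le_d {nums : List Int} {d : Int}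
    (hd : PySem.List.max? (PySem.Dict.counter nums).values (fun v => v) = some d)
    {x : Int} (hx : x ∈ nums) : (nums.count x : Int) ≤ d := by
  have hm : (nums.count x : Int) ∈ (PySem.Dict.counter nums).values := by
    rw [pv_values_counter]
    exact List.mem_map.mpr ⟨x, (PySem.Set.mem_ofList _ _).mpr hx, rfl⟩
  exact PySem.List.max?_isMax hd _ hm

theorem pv_exists_max {nums : List Int} {d : Int}
    (hd : PySem.List.max? (PySem.Dict.counter nums).values (fun v => v) = some d) :
    ∃ x ∈ nums, (nums.count x : Int) = d := by
  have hm := PySem.List.max?_mem hd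
  rw [pv_values_counter] at hm
  obtain ⟨k, hk, hkd⟩ := List.mem_map.mp hm
  exact ⟨k, (PySem.Set.mem_ofList _ _).mp hk, hkd⟩

def pvStepB (nums : List Int) (d : Int) (st : PySem.Dict Int Int × Int × Int) (p : Int × Int) :
    PySem.Dict Int Int × Int × Int :=
  let cnt := st.1.insert p.2 (st.1.getD p.2 0 + 1)
  pvShrink nums d p.2 p.1 ((p.1 - st.2.1).toNat + 1) (cnt, st.2.1, st.2.2)

theorem pv_main (nums : List Int) {d : Int}
    (hd : PySem.List.max? (PySem.Dict.counter nums).values (fun v => v) = some d) :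
    ∀ (rN : Nat), rN ≤ nums.length →
      (∀ v, ((PySem.List.enumerate (nums.take rN) 0).foldl (pvStepB nums d)
            (PySem.Dict.empty, 0, (nums.length : Int))).1.getD v 0
          = (((nums.take rN).drop (pvL nums d (rN : Int)).toNat).count v : Int)) ∧
      ((PySem.List.enumerate (nums.take rN) 0).foldl (pvStepB nums d)
            (PySem.Dict.empty, 0, (nums.length : Int))).2.1 = pvL nums d (rN : Int) ∧
      ((PySem.List.enumerate (nums.take rN) 0).foldl (pvStepB nums d)
            (PySem.Dict.empty, 0, (nums.length : Int))).2.2 = pvBestF nums d (rN : Int) := by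
  intro rN
  induction rN with
  | zero =>
    intro _
    have hL0 : pvL nums d 0 = 0 := by
      unfold pvL
      rw [pv_cands_zero]
      rfl
    have hB0 : pvBestF nums d 0 = (nums.length : Int) := by
      unfold pvBestF
      rw [pv_cands_zero]
      rfl
    simp only [List.take_zero, PySem.List.enumerate_nil, List.foldl_nil, Nat.cast_zero]
    exact ⟨fun v => by simp [PySem.Dict.getD_empty, hL0], hL0.symm, hB0.symm⟩
  | succ rN ih =>
    intro hrn1
    have hrn : rN < nums.length := by omega
    obtain ⟨hcnt, hleft, hbest⟩ := ih (by omega)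
    set x := nums[rN]'hrn with hxdef
    have hr : nums[rN]? = some x := List.getElem?_eq_getElem hrn
    have hx : x ∈ nums := List.getElem_mem hrn
    have hLnn : 0 ≤ pvL nums d (rN : Int) := pv_L_nonneg nums d _
    have hLle : pvL nums d (rN : Int) ≤ (rN : Int) := pv_L_le (by omega)
    have hlast_ge : rN ≤ pvLastN nums x := pv_last_ge hr
    have hcle : (nums.count x : Int) ≤ d := pv_count_le_d hd hx
    -- unfold one step of the fold
    have htake : nums.take (rN + 1) = nums.take rN ++ [x] := by
      rw [List.take_add_one, hr]
      rfl
    have hlen : (nums.take rN).length = rN := by rw [List.length_take]; omega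
    rw [htake, PySem.List.enumerate_append, List.foldl_append, hlen]
    simp only [PySem.List.enumerate_cons, PySem.List.enumerate_nil, List.foldl_cons, List.foldl_nil]
    rcases hfold : (PySem.List.enumerate (nums.take rN) 0).foldl (pvStepB nums d)
        (PySem.Dict.empty, 0, (nums.length : Int)) with ⟨cnt, left, best⟩
    rw [hfold] at hcnt hleft hbest
    simp only at hcnt hleft hbest
    -- the body of the fold at (rN, x)
    subst hleft hbest
    set L := pvL nums d (rN : Int) with hLdef
    set lN := L.toNat with hlNdef
    have hcastL : L = (lN : Int) := (Int.toNat_of_nonneg hLnn).symm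
    have hlNr : lN ≤ rN := by omega
    have hfle : pvFirstN nums x ≤ rN := pv_first_le hr
    have hwin1 : (nums.take (rN + 1)).drop lN = (nums.take rN).drop lN ++ [x] :=
      pv_win_succ lN rN hlNr hr
    have hcnt1 : ∀ v, (cnt.insert x (cnt.getD x 0 + 1)).getD v 0
        = (((nums.take (rN + 1)).drop lN).count v : Int) := by
      intro v
      rw [PySem.Dict.getD_insert, hwin1, List.count_append]
      by_cases hv : v = x
      · subst hv
        rw [if_pos rfl, hcnt x]
        simp
      · rw [if_neg hv, hcnt v]
        have : List.count v [x] = 0 := by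
          simp [List.count_singleton]
          exact fun hh => hv hh.symm
        rw [this]
        simp
    have hcast1 : ((rN + 1 : Nat) : Int) = (rN : Int) + 1 := by push_cast; ring
    rw [hcast1]
    simp only [pvStepB]
    simp only [zero_add]
    rw [← htake]
    by_cases hT : (nums.count x : Int) = d ∧ pvLastN nums x = rN ∧ L ≤ (pvFirstN nums x : Int)
    · -- trigger: x completes its degree inside the window
      obtain ⟨hTc, hTl, hTf⟩ := hT
      rw [hcastL]
      have hres := pv_shrink_run nums d x rN hx hTc (le_of_eq hTl)
        (((rN : Int) - (lN : Int)).toNat + 1) lN _ (pvBestF nums d (rN : Int)) hcnt1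
        (by omega) (by omega)
      refine ⟨?_, ?_, ?_⟩
      · intro v
        rw [hres.1 v]
        have hLs : pvL nums d ((rN : Int) + 1) = (pvFirstN nums x : Int) + 1 := by
          rw [pv_L_succ_new hr hx hTc hTl]
          omega
        rw [hLs]
        have htn : ((pvFirstN nums x : Int) + 1).toNat = pvFirstN nums x + 1 := by omega
        rw [htn]
      · rw [hres.2.1, pv_L_succ_new hr hx hTc hTl]
        omega
      · rw [hres.2.2, pv_Best_succ_new hr hx hTc hTl]
        unfold pvSpan
        rw [hTl]
    · -- no trigger: the while-condition fails immediately
      have hnoop : (cnt.insert x (cnt.getD x 0 + 1)).getD x 0 ≠ d := by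
        rw [hcnt1 x]
        by_cases hcd : (nums.count x : Int) = d
        · have hwlt : ((nums.take (rN + 1)).drop lN).count x < nums.count x := by
            apply pv_win_count_lt hx (by omega)
            intro hh
            obtain ⟨h1, h2⟩ := hh
            have hTl : pvLastN nums x = rN := by omega
            exact hT ⟨hcd, hTl, by omega⟩
          omega
        · have hsub : ((nums.take (rN + 1)).drop lN).count x ≤ nums.count x :=
            List.Sublist.count_le _ ((List.drop_sublist _ _).trans (List.take_sublist _ _))
          omega
      rw [hcastL, pv_shrink_noop _ _ _ _ _ _ _ hnoop]
      rw [← hcastL]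
      by_cases hcd : (nums.count x : Int) = d ∧ pvLastN nums x = rN
      · -- N1 : x completed but its first occurrence lies left of the window: dominated
        obtain ⟨hc1, hc2⟩ := hcd
        have hfx : (pvFirstN nums x : Int) < L := by
          by_contra hcc
          exact hT ⟨hc1, hc2, by omega⟩
        have hLsucc : pvL nums d ((rN : Int) + 1) = L := by
          rw [pv_L_succ_new hr hx hc1 hc2]
          omega
        have hBsucc : pvBestF nums d ((rN : Int) + 1) = pvBestF nums d (rN : Int) := by
          rw [pv_Best_succ_new hr hx hc1 hc2]
          obtain ⟨z, hz, hzL⟩ := pv_L_attained (d := d) (r := (rN : Int)) (by rw [← hLdef]; omega)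
          obtain ⟨hzn, _, hzl⟩ := pv_cands_mem hz
          have hBz := pv_Best_le_mem hz
          have hzfl := pv_first_le_last hzn
          unfold pvSpan at hBz ⊢
          rw [hc2]
          omega
        refine ⟨?_, hLsucc.symm, hBsucc.symm⟩
        intro v
        rw [hcnt1 v, hLsucc]
      · -- N2 : nothing changes
        have hceq := pv_cands_succ_eq hr hcd
        have hLsucc : pvL nums d ((rN : Int) + 1) = L := by
          rw [hLdef]
          unfold pvL
          rw [hceq]
        have hBsucc : pvBestF nums d ((rN : Int) + 1) = pvBestF nums d (rN : Int) := by
          unfold pvBestF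
          rw [hceq]
        refine ⟨?_, hLsucc.symm, hBsucc.symm⟩
        intro v
        rw [hcnt1 v, hLsucc]

-- A's running-minimum update (none = float('inf'))
def pvMinStep (acc : Option Int) (v : Int) : Option Int :=
  match acc with
  | none => some v
  | some m => if v < m then some v else some m

theorem pvMinFold_some (t : List Int) : ∀ (m : Int), t.foldl pvMinStep (some m) = some (t.foldl min m) := by
  induction t with
  | nil => intro m; rfl
  | cons v t ih =>
    intro m
    simp only [List.foldl_cons]
    have h : pvMinStep (some m) v = some (min m v) := by
      simp only [pvMinStep]
      rcases lt_or_ge v m with h | h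
      · rw [if_pos h, min_eq_right h.le]
      · rw [if_neg (not_lt.mpr h), min_eq_left h]
    rw [h, ih]

theorem pvMinFold (ls : List Int) : ls.foldl pvMinStep none = PySem.List.min? ls (fun y => y) := by
  cases ls with
  | nil => exact ((PySem.List.min?_eq_none_iff _ _).mpr rfl).symm
  | cons x t =>
    rw [PySem.List.min?_id_cons]
    simp only [List.foldl_cons]
    exact pvMinFold_some t x

-- the candidate-element list A builds from the counter's items
theorem pvElems (nums : List Int) (d : Int) :
    ((PySem.Dict.counter nums).items.filter (fun p => p.2 == d)).map (·.1)
      = (PySem.Set.ofList nums).filter (fun x => (nums.count x : Int) == d) := by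
  rw [PySem.Dict.items_counter, List.filter_map, List.map_map]
  have h1 : ((fun (p : Int × Int) => p.1) ∘ fun k => (k, (nums.count k : Int))) = id := rfl
  rw [h1, List.map_id]
  rfl

-- A's minimum loop over candidate elements equals min? of the mapped span list
theorem pvA_fold_eq (nums : List Int) (elems : List Int) (h : ∀ e ∈ elems, e ∈ nums) :
    elems.foldl
      (fun (acc : Option Int) element =>
        match PySem.List.index? nums element,
              PySem.List.index? ((PySem.List.slice? nums none none (-1)).getD []) element with
        | some first_occurrence, some ridx =>
          let last_occurrence : Int := (nums.length : Int) - 1 - (ridx : Int)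
          let subarray_length := last_occurrence - (first_occurrence : Int) + 1
          (match acc with
           | none => some subarray_length
           | some m => if subarray_length < m then some subarray_length else some m)
        | _, _ => acc) none
    = PySem.List.min? (elems.map (fun e => pvSpan nums e)) (fun y => y) := by
  rw [← pvMinFold, List.foldl_map]
  apply PySem.List.foldl_congr_mem
  intro acc e he
  have he' : e ∈ nums := h e he
  obtain ⟨k, hk⟩ := Option.isSome_iff_exists.mp ((PySem.List.index?_isSome_iff nums e).mpr he')
  obtain ⟨r, hr⟩ := Option.isSome_iff_exists.mp
    ((PySem.List.index?_isSome_iff nums.reverse e).mpr (List.mem_reverse.mpr he'))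
  have hrn : r < nums.length := by
    have := (PySem.List.getElem_of_index?_eq_some hr).fst
    simpa using this
  have hspan : pvSpan nums e = (nums.length : Int) - 1 - (r : Int) - (k : Int) + 1 := by
    unfold pvSpan pvFirstN pvLastN
    rw [hk, hr]
    simp only [Option.getD_some]
    omega
  simp only [PySem.List.slice?_none_none_neg_one, Option.getD_some, hk, hr]
  simp only [pvMinStep, hspan]

theorem pv_span_le {nums : List Int} {x : Int} (hx : x ∈ nums) :
    pvSpan nums x ≤ (nums.length : Int) := by
  have h1 := (pv_last_spec hx).1
  unfold pvSpan
  omega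

theorem pv_count_one {nums : List Int} {x : Int} (hx : x ∈ nums) (h1 : nums.count x = 1) :
    pvFirstN nums x = pvLastN nums x := by
  have hfl := pv_first_le_last hx
  by_contra hne
  have hlt : pvFirstN nums x < pvLastN nums x := by omega
  have hln := (pv_last_spec hx).1
  have hdecomp : nums.count x =
      (nums.take (pvFirstN nums x + 1)).count x + (nums.drop (pvFirstN nums x + 1)).count x := by
    conv_lhs => rw [← List.take_append_drop (pvFirstN nums x + 1) nums]
    rw [List.count_append]
  have hm1 : x ∈ nums.take (pvFirstN nums x + 1) := by
    rw [List.mem_iff_getElem?]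
    exact ⟨pvFirstN nums x, by rw [List.getElem?_take, if_pos (by omega)]; exact (pv_first_spec hx).2.1⟩
  have hm2 : x ∈ nums.drop (pvFirstN nums x + 1) := by
    rw [List.mem_iff_getElem?]
    refine ⟨pvLastN nums x - (pvFirstN nums x + 1), ?_⟩
    rw [List.getElem?_drop]
    have : pvFirstN nums x + 1 + (pvLastN nums x - (pvFirstN nums x + 1)) = pvLastN nums x := by omega
    rw [this]
    exact (pv_last_spec hx).2.1
  have hc1 := List.count_pos_iff.mpr hm1
  have hc2 := List.count_pos_iff.mpr hm2
  omega

theorem pv_span_one {nums : List Int} {x : Int} (hx : x ∈ nums) (h1 : nums.count x = 1) :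
    pvSpan nums x = 1 := by
  unfold pvSpan
  rw [pv_count_one hx h1]
  omega

-- the candidate list at step n is exactly A's max-frequency element list
theorem pv_cands_full (nums : List Int) (d : Int) :
    pvCands nums d (nums.length : Int)
      = (PySem.Set.ofList nums).filter (fun x => (nums.count x : Int) == d) := by
  unfold pvCands
  apply List.filter_congr
  intro y hy
  have hyn : y ∈ nums := (PySem.Set.mem_ofList _ _).mp hy
  have hl := (pv_last_spec hyn).1
  have : ((pvLastN nums y : Int) < (nums.length : Int)) := by omega
  simp only [this, decide_true, Bool.and_true]
  cases h : ((nums.count y : Int) == d) with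
  | true => simp [beq_iff_eq.mp h]
  | false =>
    have := beq_eq_false_iff_ne.mp h
    simp [this]

theorem pv_alt_eq (nums : List Int) (d : Int)
    (hd : PySem.List.max? (PySem.Dict.counter nums).values (fun v => v) = some d) :
    find_shortest_subarray_length_with_degree_alt nums = pvBestF nums d (nums.length : Int) := by
  simp only [find_shortest_subarray_length_with_degree_alt]
  rw [PySem.Dict.foldl_insert_getD_add_one_eq_counter, hd]
  have hmain := pv_main nums hd nums.length le_rfl
  rw [List.take_length] at hmain
  exact hmain.2.2

theorem pv_endgame (nums : List Int) (hpre : nums ≠ []) :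
    find_shortest_subarray_length_with_degree nums = find_shortest_subarray_length_with_degree_alt nums := by
  simp only [find_shortest_subarray_length_with_degree]
  rw [← PySem.Dict.counter_eq_foldl]
  cases hd : PySem.List.max? (PySem.Dict.counter nums).values (fun v => v) with
  | none =>
    simp only [find_shortest_subarray_length_with_degree_alt]
    rw [PySem.Dict.foldl_insert_getD_add_one_eq_counter, hd]
  | some d =>
    rw [pv_alt_eq nums d hd]
    dsimp only
    have hn1 : 1 ≤ (nums.length : Int) := by
      have : 0 < nums.length := List.length_pos_iff.mpr hpre
      omega
    obtain ⟨w, hwn, hwd⟩ := pv_exists_max hd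
    have hwmem : w ∈ pvCands nums d (nums.length : Int) := by
      rw [pv_cands_full]
      apply List.mem_filter.mpr
      exact ⟨(PySem.Set.mem_ofList _ _).mpr hwn, by simp [hwd]⟩
    have hnonnil : pvCands nums d (nums.length : Int) ≠ [] := List.ne_nil_of_mem hwmem
    by_cases h1 : d = 1
    · subst h1
      simp only [BEq.rfl, if_true]
      -- every max-frequency element has span 1
      have hall : ∀ y ∈ (pvCands nums 1 (nums.length : Int)).map (fun x => pvSpan nums x), y = 1 := by
        intro y hy
        obtain ⟨z, hz, hzy⟩ := List.mem_map.mp hy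
        obtain ⟨hzn, hzc, _⟩ := pv_cands_mem hz
        have : nums.count z = 1 := by omega
        rw [← hzy]
        exact pv_span_one hzn this
      have hub : pvBestF nums 1 (nums.length : Int) ≤ 1 := by
        have := pv_Best_le_mem hwmem
        have hw1 : pvSpan nums w = 1 := pv_span_one hwn (by omega)
        omega
      have hlb : 1 ≤ pvBestF nums 1 (nums.length : Int) := by
        apply pv_le_foldl_min _ _ _ _ hn1
        intro y hy
        rw [hall y hy]
      omega
    · have hne1 : (d == 1) = false := beq_eq_false_iff_ne.mpr h1
      rw [hne1]
      simp only [Bool.false_eq_true, if_false]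
      have helems : ((PySem.Dict.counter nums).items.filter (fun p => p.2 == d)).map (·.1)
          = pvCands nums d (nums.length : Int) := by
        rw [pvElems, pv_cands_full]
      rw [helems]
      have hmemn : ∀ e ∈ pvCands nums d (nums.length : Int), e ∈ nums :=
        fun e he => (pv_cands_mem he).1
      rw [pvA_fold_eq nums _ hmemn]
      rcases hc : pvCands nums d (nums.length : Int) with _ | ⟨z, t⟩
      · exact absurd hc hnonnil
      · have hzn : z ∈ nums := hmemn z (hc ▸ List.mem_cons_self)
        rw [List.map_cons, PySem.List.min?_id_cons]
        unfold pvBestF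
        rw [hc, List.map_cons, List.foldl_cons]
        rw [min_eq_right (pv_span_le hzn)]

-- ===== VERDICT (by name: the statement is the Claim_ definition above) =====
theorem find_shortest_subarray_length_with_degree_spec : Claim_equal_find_shortest_subarray_length_with_degree := by
  intro nums _ hpre
  show find_shortest_subarray_length_with_degree nums = find_shortest_subarray_length_with_degree_alt nums
  exact pv_endgame nums hpre
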